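-- pv_equiv track=rewrite | github.com/pythonRepo4/SEC-Scrape | Utility.py | returnInTags
-- ===== SOURCE A (Python) =====
-- def returnInTags(html, tagInput):
--     tag = "<" + tagInput
--     endTag = "</" + tagInput + ">"
--     returnInTags = ""
--
--     foundTag = False
--     for i in html.splitlines():
--         if(endTag in i):
--             break
--
--         if(foundTag == True):
--             returnInTags += i + " \n"
--
--         if(tag in i):
--             foundTag = True
--
--     return returnInTags
-- ===== SOURCE B (Python) =====
-- def returnInTags(html, tagInput):
--     tag = "<" + tagInput
--     endTag = "</" + tagInput + ">"
--     lines = html.splitlines()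
--     end = next((i for i, l in enumerate(lines) if endTag in l), len(lines))
--     body = lines[:end]
--     start = next((i for i, l in enumerate(body) if tag in l), None)
--     if start is None:
--         return ""
--     return "".join(l + " \n" for l in body[start + 1:])
-- ===== Notes on version B (the rewrite author's own statement) =====
-- stated objective: alternative
-- what changed: Replaced A's single stateful scan with a break and a foundTag flag by boundary location (first end-tag line index, then first start-tag line index within that prefix) followed by a slice-and-join pass.
import Mathlib
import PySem

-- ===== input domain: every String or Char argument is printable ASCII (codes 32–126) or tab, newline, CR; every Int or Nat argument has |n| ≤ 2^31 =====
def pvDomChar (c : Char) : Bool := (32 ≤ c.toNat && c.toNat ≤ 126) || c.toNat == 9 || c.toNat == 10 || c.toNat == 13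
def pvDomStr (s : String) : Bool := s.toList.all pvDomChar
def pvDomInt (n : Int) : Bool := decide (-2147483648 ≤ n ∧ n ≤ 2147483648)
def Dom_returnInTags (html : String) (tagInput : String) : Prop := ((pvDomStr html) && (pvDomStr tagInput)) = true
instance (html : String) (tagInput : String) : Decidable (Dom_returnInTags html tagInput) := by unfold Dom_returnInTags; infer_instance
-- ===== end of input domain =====

-- B replaces A's stateful scan-with-break by locating the end/start boundary lines and
-- joining the sliced lines; same O(n) cost, different decomposition (objective: alternative).

-- ===== PORT A =====
-- the 'for i in html.splitlines(): …' loop with its break, foundTag flag and accumulator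
def returnInTagsLoop (tag endTag : String) : List String → Bool → String → String
  | [], _, acc => acc
  | i :: rest, foundTag, acc =>
    if PySem.Str.isIn endTag i then acc
    else
      let acc' := if foundTag then acc ++ (i ++ " \n") else acc
      let found' := if PySem.Str.isIn tag i then true else foundTag
      returnInTagsLoop tag endTag rest found' acc'

def returnInTags (html : String) (tagInput : String) : String :=
  let tag := "<" ++ tagInput
  let endTag := "</" ++ tagInput ++ ">"
  returnInTagsLoop tag endTag (PySem.Str.splitlines html) false ""

-- ===== PORT B =====
def returnInTags_alt (html : String) (tagInput : String) : String :=
  let tag := "<" ++ tagInput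
  let endTag := "</" ++ tagInput ++ ">"
  let lines := PySem.Str.splitlines html
  let e := (lines.findIdx? (fun l => PySem.Str.isIn endTag l)).getD lines.length
  let body := lines.take e
  match body.findIdx? (fun l => PySem.Str.isIn tag l) with
  | none => ""
  | some s => PySem.Str.join "" ((body.drop (s + 1)).map (fun l => l ++ " \n"))

-- ===== PRECONDITION & SPEC =====
def Spec_returnInTags (html : String) (tagInput : String) (out : String) : Prop := out = returnInTags_alt html tagInput
instance (html : String) (tagInput : String) (out : String) : Decidable (Spec_returnInTags html tagInput out) := by unfold Spec_returnInTags; infer_instance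

-- ===== CLAIM (what is proved, stated in full; the proofs are below) =====
def Claim_equal_returnInTags : Prop := ∀ (html : String) (tagInput : String), Dom_returnInTags html tagInput → Spec_returnInTags html tagInput (returnInTags html tagInput)

-- ===== LEMMAS AND PROOFS =====

def pvTail (p : String → Bool) : List String → String
  | [] => ""
  | l :: ls => if p l then "" else (l ++ " \n") ++ pvTail p ls
def pvBody (p q : String → Bool) : List String → String
  | [] => ""
  | l :: ls => if p l then "" else if q l then pvTail p ls else pvBody p q ls

theorem pv_loop_eq (tag endTag : String) (ls : List String) :
    ∀ (found : Bool) (acc : String),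
      returnInTagsLoop tag endTag ls found acc
        = acc ++ (if found then pvTail (PySem.Str.isIn endTag) ls
                  else pvBody (PySem.Str.isIn endTag) (PySem.Str.isIn tag) ls) := by
  induction ls with
  | nil => intro found acc; cases found <;> simp [returnInTagsLoop, pvTail, pvBody]
  | cons l rest ih =>
    intro found acc
    by_cases hp : PySem.Chars.isIn endTag.toList l.toList
    · cases found <;> simp [returnInTagsLoop, pvTail, pvBody, hp]
    · by_cases hq : PySem.Chars.isIn tag.toList l.toList <;> cases found <;>
        simp [returnInTagsLoop, pvTail, pvBody, hp, hq, ih, String.append_assoc]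

theorem flatten_intersperse_nil {α : Type} (l : List (List α)) :
    (List.intersperse ([] : List α) l).flatten = l.flatten := by
  induction l with
  | nil => rfl
  | cons a t ih =>
    cases t with
    | nil => rfl
    | cons b t' => simpa [List.intersperse] using ih

theorem pv_join_cons (x : String) (xs : List String) :
    PySem.Str.join "" (x :: xs) = x ++ PySem.Str.join "" xs := by
  simp [PySem.Str.join, PySem.Chars.join, List.intercalate, flatten_intersperse_nil]

theorem pv_getD_map_succ (o : Option Nat) (n : Nat) :
    (o.map (· + 1)).getD (n + 1) = o.getD n + 1 := by cases o <;> rfl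

theorem pv_join_nil : PySem.Str.join "" ([] : List String) = "" := rfl

theorem pv_tail_eq (p : String → Bool) (ls : List String) :
    PySem.Str.join "" ((ls.take ((ls.findIdx? p).getD ls.length)).map (fun l => l ++ " \n"))
      = pvTail p ls := by
  induction ls with
  | nil => rfl
  | cons l t ih =>
    by_cases hp : p l
    · simp [List.findIdx?_cons, hp, pvTail, pv_join_nil]
    · have he : ((l :: t).findIdx? p).getD (l :: t).length
          = ((t.findIdx? p).getD t.length) + 1 := by
        simp [List.findIdx?_cons, hp]
      rw [he, List.take_succ_cons, List.map_cons, pv_join_cons, ih]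
      simp [pvTail, hp]

theorem pv_alt_eq (tag endTag : String) (ls : List String) :
    (let e := (ls.findIdx? (fun l => PySem.Str.isIn endTag l)).getD ls.length
     let body := ls.take e
     match body.findIdx? (fun l => PySem.Str.isIn tag l) with
     | none => ""
     | some s => PySem.Str.join "" ((body.drop (s + 1)).map (fun l => l ++ " \n")))
      = pvBody (PySem.Str.isIn endTag) (PySem.Str.isIn tag) ls := by
  induction ls with
  | nil => rfl
  | cons l t ih =>
    by_cases hp : PySem.Str.isIn endTag l
    · simp only [List.findIdx?_cons, hp, if_true, Option.getD_some, List.take_zero,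
        List.findIdx?_nil, pvBody]
    · have he : ((l :: t).findIdx? (fun l => PySem.Str.isIn endTag l)).getD (l :: t).length
          = ((t.findIdx? (fun l => PySem.Str.isIn endTag l)).getD t.length) + 1 := by
        simp only [List.findIdx?_cons, hp, Bool.false_eq_true, if_false, List.length_cons,
          pv_getD_map_succ]
      simp only [he, List.take_succ_cons]
      by_cases hq : PySem.Str.isIn tag l
      · simp only [List.findIdx?_cons, if_pos hq, List.drop_succ_cons, List.drop_zero,
          pv_tail_eq, pvBody, if_neg hp]
      · simp only [List.findIdx?_cons, hq, Bool.false_eq_true, if_false]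
        cases hfind : List.findIdx? (fun l => PySem.Str.isIn tag l)
            (t.take ((t.findIdx? (fun l => PySem.Str.isIn endTag l)).getD t.length)) with
        | none =>
          simp only [hfind] at ih
          simp only [Option.map_none, pvBody, if_neg hp, if_neg hq]
          exact ih
        | some s =>
          simp only [hfind] at ih
          simp only [Option.map_some, List.drop_succ_cons, pvBody, if_neg hp, if_neg hq]
          exact ih

-- ===== VERDICT (by name: the statement is the Claim_ definition above) =====
theorem returnInTags_spec : Claim_equal_returnInTags := by
  intro html tagInput _
  unfold Spec_returnInTags returnInTags returnInTags_alt
  rw [pv_loop_eq, pv_alt_eq]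
  simp
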